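-- pv_equiv track=rewrite | github.com/misty-step/bitterblossom | scripts/conductor.py | issue_priority
-- ===== SOURCE A (Python) =====
-- def issue_priority(labels: list[str]) -> tuple[int, str]:
--     order = {"P0": 0, "P1": 1, "P2": 2, "P3": 3}
--     best = 9
--     matched = ""
--     for label in labels:
--         upper = label.upper()
--         if upper in order and order[upper] < best:
--             best = order[upper]
--             matched = upper
--     return best, matched
-- ===== SOURCE B (Python) =====
-- def issue_priority(labels: list[str]) -> tuple[int, str]:
--     seen = {label.upper() for label in labels}
--     for rank, name in ((0, "P0"), (1, "P1"), (2, "P2"), (3, "P3")):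
--         if name in seen:
--             return rank, name
--     return 9, ""
-- ===== Notes on version B (the rewrite author's own statement) =====
-- stated objective: alternative
-- what changed: Inverted the iteration: instead of scanning the labels and tracking a running minimum, B builds a set of uppercased labels once and walks the fixed priority table P0..P3 in order, returning the first entry present in the set.
import Mathlib
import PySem

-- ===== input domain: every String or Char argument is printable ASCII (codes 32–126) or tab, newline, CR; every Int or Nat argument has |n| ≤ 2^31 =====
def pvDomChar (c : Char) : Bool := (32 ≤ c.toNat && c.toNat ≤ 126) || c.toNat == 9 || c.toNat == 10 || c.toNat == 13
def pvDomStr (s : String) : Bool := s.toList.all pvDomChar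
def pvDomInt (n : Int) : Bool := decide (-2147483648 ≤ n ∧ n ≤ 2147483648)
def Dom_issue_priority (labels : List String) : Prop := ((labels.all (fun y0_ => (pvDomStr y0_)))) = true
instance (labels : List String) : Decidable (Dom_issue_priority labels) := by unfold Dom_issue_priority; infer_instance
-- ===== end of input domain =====

-- B inverts the iteration: it builds the set of uppercased labels once and walks the
-- fixed priority table P0..P3 in order, returning the first entry present in the set.

-- ===== PORT A =====
def pvOrderA : PySem.Dict String Int := PySem.Dict.ofList [("P0", 0), ("P1", 1), ("P2", 2), ("P3", 3)]

-- the body of A's for-loop: update (best, matched) from one label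
def pvStepA (st : Int × String) (label : String) : Int × String :=
  let upper := PySem.Str.upper label
  match pvOrderA.get? upper with          -- 'upper in order and order[upper] < best'
  | some v => if v < st.1 then (v, upper) else st
  | none => st

def issue_priority (labels : List String) : Int × String :=
  labels.foldl pvStepA (9, "")

-- ===== PORT B =====
def pvCandB : List (Int × String) := [(0, "P0"), (1, "P1"), (2, "P2"), (3, "P3")]

def issue_priority_alt (labels : List String) : Int × String :=
  let seen : PySem.Set String := PySem.Set.ofList (labels.map PySem.Str.upper)
  -- 'for rank, name in ((0,"P0"),…): if name in seen: return rank, name' = first match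
  match pvCandB.find? (fun p => PySem.Set.contains seen p.2) with
  | some p => p
  | none => (9, "")

-- ===== PRECONDITION & SPEC =====
def Spec_issue_priority (labels : List String) (out : Int × String) : Prop := out = issue_priority_alt labels
instance (labels : List String) (out : Int × String) : Decidable (Spec_issue_priority labels out) := by unfold Spec_issue_priority; infer_instance

-- ===== CLAIM (what is proved, stated in full; the proofs are below) =====
def Claim_equal_issue_priority : Prop := ∀ (labels : List String), Dom_issue_priority labels → Spec_issue_priority labels (issue_priority labels)

-- ===== LEMMAS AND PROOFS =====

-- the reverse map used only in the proofs to state A's loop invariant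
def pvRev (v : Int) : String :=
  if v = 0 then "P0" else if v = 1 then "P1" else if v = 2 then "P2" else if v = 3 then "P3" else ""

-- any hit in the order dict: the value reverse-looks-up to the key, and the value is < 9
theorem pvOrder_hit (u : String) (v : Int) (h : pvOrderA.get? u = some v) :
    pvRev v = u ∧ v < 9 := by
  have e : pvOrderA = PySem.Dict.mk [("P0", 0), ("P1", 1), ("P2", 2), ("P3", 3)] := by decide
  rw [e] at h
  simp only [PySem.Dict.get?_mk_cons] at h
  split_ifs at h with h0 h1 h2 h3 <;>
    first
      | (simp only [Option.some.injEq] at h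
         subst h
         refine ⟨?_, by norm_num⟩
         first
           | rw [← eq_of_beq h0]; decide
           | rw [← eq_of_beq h1]; decide
           | rw [← eq_of_beq h2]; decide
           | rw [← eq_of_beq h3]; decide)
      | simp [PySem.Dict.get?] at h

-- membership of value v among the hits ↔ its name appears among the uppercased labels
theorem pvHit_iff (labels : List String) (v : Int) :
    v ∈ labels.filterMap (fun l => pvOrderA.get? (PySem.Str.upper l)) ↔
      ((v = 0 ∨ v = 1 ∨ v = 2 ∨ v = 3) ∧ pvRev v ∈ labels.map PySem.Str.upper) := by
  rw [List.mem_filterMap]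
  constructor
  · rintro ⟨l, hl, hget⟩
    have e : pvOrderA = PySem.Dict.mk [("P0", 0), ("P1", 1), ("P2", 2), ("P3", 3)] := by decide
    rw [e] at hget
    simp only [PySem.Dict.get?_mk_cons] at hget
    split_ifs at hget with h0 h1 h2 h3 <;>
      first
        | (simp only [Option.some.injEq] at hget
           subst hget
           refine ⟨by norm_num, ?_⟩
           rw [List.mem_map]
           exact ⟨l, hl, by
             first
               | rw [← eq_of_beq h0]; rfl
               | rw [← eq_of_beq h1]; rfl
               | rw [← eq_of_beq h2]; rfl
               | rw [← eq_of_beq h3]; rfl⟩)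
        | simp [PySem.Dict.get?] at hget
  · rintro ⟨hv, hm⟩
    rw [List.mem_map] at hm
    obtain ⟨l, hl, hu⟩ := hm
    refine ⟨l, hl, ?_⟩
    rw [hu]
    rcases hv with h | h | h | h <;> subst h <;> decide

-- the loop invariant: from any canonical state (b, pvRev b) the loop computes
-- (min over hits, pvRev of it)
theorem pvLoopA (labels : List String) : ∀ (b : Int),
    labels.foldl pvStepA (b, pvRev b) =
      ((labels.filterMap (fun l => pvOrderA.get? (PySem.Str.upper l))).foldl min b,
       pvRev ((labels.filterMap (fun l => pvOrderA.get? (PySem.Str.upper l))).foldl min b)) := by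
  induction labels with
  | nil => intro b; simp
  | cons l t ih =>
    intro b
    simp only [List.foldl_cons, List.filterMap_cons]
    cases h : pvOrderA.get? (PySem.Str.upper l) with
    | none =>
      simp only [pvStepA, h]
      exact ih b
    | some v =>
      obtain ⟨hrev, _⟩ := pvOrder_hit _ _ h
      simp only [pvStepA, h, List.foldl_cons]
      by_cases hv : v < b
      · rw [if_pos hv]
        have hm : min b v = v := by omega
        rw [hm, ← hrev]
        exact ih v
      · rw [if_neg hv]
        have hm : min b v = b := by omega
        rw [hm]
        exact ih b

-- generic facts about 'foldl min'
theorem pvFoldMin_le_init (l : List Int) : ∀ (a : Int), l.foldl min a ≤ a := by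
  induction l with
  | nil => intro a; simp
  | cons x t ih => intro a; simpa using le_trans (ih (min a x)) (by omega)

theorem pvFoldMin_mem_or (l : List Int) : ∀ (a : Int), l.foldl min a = a ∨ l.foldl min a ∈ l := by
  induction l with
  | nil => intro a; simp
  | cons x t ih =>
    intro a
    simp only [List.foldl_cons, List.mem_cons]
    rcases ih (min a x) with h | h
    · by_cases hx : a ≤ x
      · left; omega
      · right; left; omega
    · right; right; exact h

theorem pvFoldMin_le_mem (l : List Int) : ∀ (a : Int), ∀ v ∈ l, l.foldl min a ≤ v := by
  induction l with
  | nil => intro a v hv; simp at hv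
  | cons x t ih =>
    intro a v hv
    simp only [List.mem_cons] at hv
    simp only [List.foldl_cons]
    rcases hv with h | h
    · have h1 := pvFoldMin_le_init t (min a x)
      omega
    · exact ih (min a x) v h

-- ===== VERDICT (by name: the statement is the Claim_ definition above) =====
theorem issue_priority_spec : Claim_equal_issue_priority := by
  intro labels _
  show issue_priority labels = issue_priority_alt labels
  unfold issue_priority issue_priority_alt
  rw [show ((9 : Int), ("" : String)) = ((9 : Int), pvRev 9) from by decide, pvLoopA labels 9]
  set hits := labels.filterMap (fun l => pvOrderA.get? (PySem.Str.upper l)) with hh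
  set m := labels.map PySem.Str.upper with hmd
  set r := hits.foldl min 9 with hr
  have hle9 : r ≤ 9 := pvFoldMin_le_init hits 9
  have hmem : r = 9 ∨ r ∈ hits := pvFoldMin_mem_or hits 9
  have hlo : ∀ v ∈ hits, r ≤ v := pvFoldMin_le_mem hits 9
  have hin : ∀ v : Int, v ∈ hits ↔ ((v = 0 ∨ v = 1 ∨ v = 2 ∨ v = 3) ∧ pvRev v ∈ m) :=
    fun v => pvHit_iff labels v
  have hcontains : ∀ s : String, (PySem.Set.contains (PySem.Set.ofList m) s) = (s ∈ m : Bool) := by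
    intro s
    rcases h : (decide (s ∈ m) : Bool) with _ | _
    · simp only [decide_eq_false_iff_not] at h
      simp [PySem.Set.mem_ofList, h]
    · simp only [decide_eq_true_eq] at h
      simp [PySem.Set.mem_ofList, h]
  simp only [pvCandB, List.find?, hcontains]
  by_cases h0 : "P0" ∈ m
  · have : r = 0 := by
      have := hlo 0 ((hin 0).mpr ⟨by norm_num, by simpa [pvRev] using h0⟩)
      rcases hmem with h | h
      · omega
      · have := ((hin r).mp h).1; omega
    simp [h0, this, pvRev]
  · have hr0 : r ≠ 0 := fun he => h0 (by simpa [pvRev, he] using ((hin r).mp (hmem.resolve_left (by omega))).2)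
    by_cases h1 : "P1" ∈ m
    · have : r = 1 := by
        have := hlo 1 ((hin 1).mpr ⟨by norm_num, by simpa [pvRev] using h1⟩)
        rcases hmem with h | h
        · omega
        · have := ((hin r).mp h).1; omega
      simp [h0, h1, this, pvRev]
    · have hr1 : r ≠ 1 := fun he => h1 (by simpa [pvRev, he] using ((hin r).mp (hmem.resolve_left (by omega))).2)
      by_cases h2 : "P2" ∈ m
      · have : r = 2 := by
          have := hlo 2 ((hin 2).mpr ⟨by norm_num, by simpa [pvRev] using h2⟩)
          rcases hmem with h | h
          · omega
          · have := ((hin r).mp h).1; omega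
        simp [h0, h1, h2, this, pvRev]
      · have hr2 : r ≠ 2 := fun he => h2 (by simpa [pvRev, he] using ((hin r).mp (hmem.resolve_left (by omega))).2)
        by_cases h3 : "P3" ∈ m
        · have : r = 3 := by
            have := hlo 3 ((hin 3).mpr ⟨by norm_num, by simpa [pvRev] using h3⟩)
            rcases hmem with h | h
            · omega
            · have := ((hin r).mp h).1; omega
          simp [h0, h1, h2, h3, this, pvRev]
        · have hr3 : r ≠ 3 := fun he => h3 (by simpa [pvRev, he] using ((hin r).mp (hmem.resolve_left (by omega))).2)
          have : r = 9 := by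
            rcases hmem with h | h
            · exact h
            · have := ((hin r).mp h).1; omega
          simp [h0, h1, h2, h3, this, pvRev]
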